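-- pv_equiv track=rewrite | github.com/T-Srikanth/DSML | A7.py | alt_subarray
-- ===== SOURCE A (Python) =====
-- def alt_subarray(arr, B):
--   n = len(arr)
--   sub_length = 2*B+1
--   res = []
--   for i in range(n-sub_length+1):
--     curr_val = arr[i]
--     flag = 1
--     for j in range(i+1, i+sub_length):
--       if arr[j] == curr_val:
--         flag = 0
--         break
--       curr_val = arr[j]
--     if(flag == 1):
--       res.append(i+B)
--   return res
-- ===== SOURCE B (Python) =====
-- def alt_subarray(arr, B):
--     n = len(arr)
--     L = 2 * B + 1
--     # bad[k] == 1 iff arr[k] == arr[k+1]; a window starting at i is good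
--     # iff no bad mark falls in [i, i+L-1), checked in O(1) via prefix sums.
--     bad = [1 if arr[k] == arr[k + 1] else 0 for k in range(n - 1)]
--     pref = [0]
--     for x in bad:
--         pref.append(pref[-1] + x)
--     return [i + B for i in range(n - L + 1) if pref[i + L - 1] - pref[i] == 0]
-- ===== Notes on version B (the rewrite author's own statement) =====
-- stated objective: alternative
-- what changed: Instead of rescanning each window for an equal adjacent pair, B precomputes adjacent-equality marks and their prefix sums once and tests each window with a single O(1) prefix-sum difference.
import Mathlib
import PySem

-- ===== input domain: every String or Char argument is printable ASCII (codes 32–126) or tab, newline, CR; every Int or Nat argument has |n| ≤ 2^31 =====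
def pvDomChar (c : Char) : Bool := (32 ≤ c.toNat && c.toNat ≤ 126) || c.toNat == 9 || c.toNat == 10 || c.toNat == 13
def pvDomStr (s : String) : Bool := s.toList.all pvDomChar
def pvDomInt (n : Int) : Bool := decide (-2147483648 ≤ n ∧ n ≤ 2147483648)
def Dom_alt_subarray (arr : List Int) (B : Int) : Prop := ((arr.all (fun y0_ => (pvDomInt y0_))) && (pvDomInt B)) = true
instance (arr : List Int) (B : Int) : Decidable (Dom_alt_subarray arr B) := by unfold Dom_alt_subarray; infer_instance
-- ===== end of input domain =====

-- B replaces A's per-window rescan by adjacent-equality marks with prefix sums,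
-- computed once, so each window is tested by one prefix-sum difference (alternative algorithm).

-- ===== PORT A =====
-- the inner 'for j' loop with its break and running curr_val
def altInner (arr : List Int) (js : List Int) (curr : Int) : Bool :=
  match js with
  | [] => true
  | j :: rest =>
      let aj := PySem.List.pyGetD arr j 0
      if aj == curr then false
      else altInner arr rest aj

def alt_subarray (arr : List Int) (B : Int) : List Int :=
  let n : Int := arr.length
  let subLength := 2 * B + 1
  (PySem.List.pyRange 0 (n - subLength + 1) 1).foldl (fun res i =>
      let currVal := PySem.List.pyGetD arr i 0
      if altInner arr (PySem.List.pyRange (i + 1) (i + subLength) 1) currVal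
      then res ++ [i + B] else res) []

-- ===== PORT B =====
def alt_subarray_alt (arr : List Int) (B : Int) : List Int :=
  let n : Int := arr.length
  let L := 2 * B + 1
  let bad := (PySem.List.pyRange 0 (n - 1) 1).map (fun k =>
      if PySem.List.pyGetD arr k 0 == PySem.List.pyGetD arr (k + 1) 0 then (1 : Int) else 0)
  let pref := bad.foldl (fun p x => p ++ [PySem.List.pyGetD p (-1) 0 + x]) [0]
  ((PySem.List.pyRange 0 (n - L + 1) 1).filter (fun i =>
      PySem.List.pyGetD pref (i + L - 1) 0 - PySem.List.pyGetD pref i 0 == 0)).map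
    (fun i => i + B)

-- ===== PRECONDITION & SPEC =====
-- for B < 0 the Python A indexes arr past its end (IndexError); nothing else raises
def Pre_alt_subarray (arr : List Int) (B : Int) : Prop := 0 ≤ B
instance (arr : List Int) (B : Int) : Decidable (Pre_alt_subarray arr B) := by
  unfold Pre_alt_subarray; infer_instance

def pvWitness_alt_subarray : List Int × Int := ([1, 2, 1, 1, 3], 1)

def Spec_alt_subarray (arr : List Int) (B : Int) (out : List Int) : Prop := out = alt_subarray_alt arr B
instance (arr : List Int) (B : Int) (out : List Int) : Decidable (Spec_alt_subarray arr B out) := by unfold Spec_alt_subarray; infer_instance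

-- ===== CLAIM (what is proved, stated in full; the proofs are below) =====
def Claim_equal_alt_subarray : Prop := ∀ (arr : List Int) (B : Int), Dom_alt_subarray arr B → Pre_alt_subarray arr B → Spec_alt_subarray arr B (alt_subarray arr B)

-- ===== LEMMAS AND PROOFS =====

-- the prefix-sum list built by B's loop is the list of partial sums of bad
theorem pref_eq (l : List Int) :
    l.foldl (fun p x => p ++ [PySem.List.pyGetD p (-1) 0 + x]) [0]
      = (List.range (l.length + 1)).map (fun m => ((l.take m).sum : Int)) := by
  induction l using List.reverseRecOn with
  | nil => simp
  | append_singleton l x ih =>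
      rw [List.foldl_append, ih]
      simp only [List.foldl_cons, List.foldl_nil, List.length_append, List.length_singleton]
      have hlast : PySem.List.pyGetD
          ((List.range (l.length + 1)).map (fun m => ((l.take m).sum : Int))) (-1) 0 = l.sum := by
        rw [List.range_succ, List.map_append, List.map_singleton,
            PySem.List.pyGetD_neg_one_append_singleton, List.take_of_length_le (le_refl _)]
      rw [hlast]
      rw [show l.length + 1 + 1 = (l.length + 1) + 1 from rfl, List.range_succ (n := l.length + 1),
          List.map_append, List.map_singleton]
      congr 1
      · apply List.map_congr_left
        intro m hm
        simp only [List.mem_range] at hm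
        rw [List.take_append_of_le_length (by omega)]
      · rw [List.take_of_length_le (by simp)]
        simp

-- a list of nonnegative integers sums to zero iff every element is zero
theorem sum_zero_iff_all (s : List Int) (h : ∀ x ∈ s, 0 ≤ x) :
    s.sum = 0 ↔ ∀ x ∈ s, x = 0 := by
  induction s with
  | nil => simp
  | cons a s ih =>
      simp only [List.sum_cons, List.mem_cons, forall_eq_or_imp]
      have ha := h a (by simp)
      have hs : ∀ x ∈ s, 0 ≤ x := fun x hx => h x (by simp [hx])
      have hsum : 0 ≤ s.sum := List.sum_nonneg hs
      rw [← ih hs]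
      omega

-- a prefix-sum difference over nonnegative entries vanishes iff the segment is all zero
theorem sum_seg_zero (l : List Int) (h0 : ∀ x ∈ l, 0 ≤ x) (m M : Nat)
    (hm : m ≤ M) (hM : M ≤ l.length) :
    ((l.take M).sum - (l.take m).sum = 0) ↔ ∀ k, m ≤ k → k < M → l.getD k 0 = 0 := by
  have hsplit : l.take M = l.take m ++ (l.drop m).take (M - m) := by
    rw [← List.take_add, Nat.add_sub_cancel' hm]
  rw [hsplit, List.sum_append]
  have hseg : ∀ x ∈ (l.drop m).take (M - m), 0 ≤ x := by
    intro x hx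
    exact h0 x (List.mem_of_mem_drop (List.mem_of_mem_take hx))
  rw [show (l.take m).sum + ((l.drop m).take (M - m)).sum - (l.take m).sum
        = ((l.drop m).take (M - m)).sum by ring]
  rw [sum_zero_iff_all _ hseg]
  constructor
  · intro h k h1 h2
    have hk : k < l.length := by omega
    rw [List.getD_eq_getElem l 0 hk]
    have : l[k] = ((l.drop m).take (M - m))[k - m]'(by simp; omega) := by
      rw [List.getElem_take, List.getElem_drop]
      congr 1; omega
    rw [this]
    exact h _ (List.getElem_mem _)
  · intro h x hx
    obtain ⟨j, hj, rfl⟩ := List.mem_iff_getElem.mp hx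
    rw [List.getElem_take, List.getElem_drop]
    have hjl : (M - m) ⊓ (l.length - m) ≤ M - m := by simp
    have := h (m + j) (by omega) (by simp at hj; omega)
    rwa [List.getD_eq_getElem l 0 (by simp at hj; omega)] at this

-- the inner loop of A checks that no two adjacent elements of the window coincide
theorem altInner_iff_aux (arr : List Int) (b : Int) (N : Nat) :
    ∀ (a : Int), (b - a).toNat ≤ N →
    altInner arr (PySem.List.pyRange a b 1) (PySem.List.pyGetD arr (a - 1) 0)
      = decide (∀ k : Int, a ≤ k → k < b →
          PySem.List.pyGetD arr k 0 ≠ PySem.List.pyGetD arr (k - 1) 0) := by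
  induction N with
  | zero =>
      intro a hN
      rw [PySem.List.pyRange_one_eq_nil (by omega)]
      simp only [altInner]
      symm; rw [decide_eq_true_iff]
      intro k h1 h2; omega
  | succ N ih =>
      intro a hN
      by_cases hab : b ≤ a
      · rw [PySem.List.pyRange_one_eq_nil hab]
        simp only [altInner]
        symm; rw [decide_eq_true_iff]
        intro k h1 h2; omega
      · rw [PySem.List.pyRange_one_cons (by omega)]
        simp only [altInner]
        by_cases heq : PySem.List.pyGetD arr a 0 = PySem.List.pyGetD arr (a - 1) 0
        · rw [if_pos (by simpa using heq)]
          symm; rw [decide_eq_false_iff_not]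
          intro hP
          exact (hP a le_rfl (by omega)) heq
        · rw [if_neg (by simpa using heq)]
          have ha : PySem.List.pyGetD arr a 0 = PySem.List.pyGetD arr ((a + 1) - 1) 0 := by
            norm_num
          rw [ha, ih (a + 1) (by omega)]
          rw [decide_eq_decide]
          constructor
          · intro h k h1 h2
            rcases eq_or_lt_of_le h1 with rfl | h1'
            · simpa using heq
            · exact h k (by omega) h2
          · intro h k h1 h2
            exact h k (by omega) h2

theorem altInner_iff (arr : List Int) (a b : Int) :
    altInner arr (PySem.List.pyRange a b 1) (PySem.List.pyGetD arr (a - 1) 0)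
      = decide (∀ k : Int, a ≤ k → k < b →
          PySem.List.pyGetD arr k 0 ≠ PySem.List.pyGetD arr (k - 1) 0) :=
  altInner_iff_aux arr b (b - a).toNat a le_rfl

-- A's window test agrees with B's prefix-sum test at each window start i
theorem pointwise (arr : List Int) (B : Int) (hB : 0 ≤ B) (i : Int)
    (hi0 : 0 ≤ i) (hi1 : i < (arr.length : Int) - (2 * B + 1) + 1)
    (bad : List Int)
    (hbad : bad = (PySem.List.pyRange 0 ((arr.length : Int) - 1) 1).map (fun k =>
      if PySem.List.pyGetD arr k 0 == PySem.List.pyGetD arr (k + 1) 0 then (1 : Int) else 0)) :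
    altInner arr (PySem.List.pyRange (i + 1) (i + (2 * B + 1)) 1) (PySem.List.pyGetD arr i 0) =
    (PySem.List.pyGetD ((List.range (bad.length + 1)).map (fun m => ((bad.take m).sum : Int)))
          (i + (2 * B + 1) - 1) 0 -
        PySem.List.pyGetD ((List.range (bad.length + 1)).map (fun m => ((bad.take m).sum : Int)))
          i 0 == 0) := by
  have hn : 1 ≤ arr.length := by omega
  have hbadlen : bad.length = arr.length - 1 := by
    rw [hbad, List.length_map, PySem.List.length_pyRange_one]; omega
  have hidx : ∀ (m : Nat), m < arr.length →
      PySem.List.pyGetD ((List.range (bad.length + 1)).map (fun m => ((bad.take m).sum : Int)))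
        ((m : Int)) 0 = (bad.take m).sum := by
    intro m hm
    rw [PySem.List.pyGetD_natCast,
        List.getD_eq_getElem _ 0 (by rw [List.length_map, List.length_range]; omega),
        List.getElem_map, List.getElem_range]
  have h1 : PySem.List.pyGetD ((List.range (bad.length + 1)).map (fun m => ((bad.take m).sum : Int)))
      i 0 = (bad.take i.toNat).sum := by
    rw [show i = ((i.toNat : Int)) by omega]
    exact hidx i.toNat (by omega)
  have h2 : PySem.List.pyGetD ((List.range (bad.length + 1)).map (fun m => ((bad.take m).sum : Int)))
      (i + (2 * B + 1) - 1) 0 = (bad.take (i + 2*B).toNat).sum := by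
    rw [show i + (2 * B + 1) - 1 = (((i + 2*B).toNat : Int)) by omega]
    exact hidx (i + 2*B).toNat (by omega)
  rw [h1, h2]
  rw [show PySem.List.pyGetD arr i 0 = PySem.List.pyGetD arr ((i + 1) - 1) 0 by norm_num]
  rw [altInner_iff]
  rw [Bool.eq_iff_iff]
  simp only [decide_eq_true_iff, beq_iff_eq]
  have hnn : ∀ x ∈ bad, 0 ≤ x := by
    intro x hx
    rw [hbad] at hx
    obtain ⟨k, _, rfl⟩ := List.mem_map.mp hx
    split <;> omega
  rw [sum_seg_zero bad hnn i.toNat (i + 2*B).toNat (by omega) (by omega)]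
  have hbadget : ∀ (k : Nat), k < arr.length - 1 →
      (bad.getD k 0 = 0 ↔ PySem.List.pyGetD arr (k : Int) 0 ≠ PySem.List.pyGetD arr ((k : Int) + 1) 0) := by
    intro k hk
    have hkb : k < bad.length := by omega
    rw [List.getD_eq_getElem bad 0 hkb]
    have : bad[k]'hkb = if PySem.List.pyGetD arr (k : Int) 0 == PySem.List.pyGetD arr ((k : Int) + 1) 0
        then (1 : Int) else 0 := by
      simp only [hbad, List.getElem_map, PySem.List.getElem_pyRange_one, zero_add]
    rw [this]
    split <;> rename_i h
    · simp only [beq_iff_eq] at h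
      constructor
      · intro h0; omega
      · intro hne; exact absurd h hne
    · simp only [beq_iff_eq] at h
      exact ⟨fun _ => h, fun _ => rfl⟩
  constructor
  · intro h k hk1 hk2
    rw [hbadget k (by omega)]
    intro heq
    have := h ((k : Int) + 1) (by omega) (by omega)
    rw [show (k : Int) + 1 - 1 = (k : Int) by ring] at this
    exact this heq.symm
  · intro h k hk1 hk2
    intro heq
    have h2 := h (k - 1).toNat (by omega) (by omega)
    rw [hbadget (k - 1).toNat (by omega), show (((k - 1).toNat : Int)) = k - 1 by omega,
        show k - 1 + 1 = k by ring] at h2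
    exact h2 heq.symm

-- ===== VERDICT (by name: the statement is the Claim_ definition above) =====
theorem alt_subarray_spec : Claim_equal_alt_subarray := by
  intro arr B _ hB
  unfold Spec_alt_subarray
  unfold alt_subarray alt_subarray_alt
  dsimp only
  rw [pref_eq]
  rw [PySem.List.foldl_append_if]
  rw [List.nil_append]
  refine congrArg _ (List.filter_congr ?_)
  intro i hi
  rw [PySem.List.mem_pyRange_one] at hi
  exact pointwise arr B hB i hi.1 hi.2 _ rfl
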